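-- pv_equiv track=rewrite | github.com/pypi-data/pypi-mirror-309 | packages/cvm-sqlite/cvm_sqlite-1.0.0.tar.gz/cvm_sqlite-1.0.0/src/cvm_sqlite/utils.py | associate_tables_and_schemas
-- ===== SOURCE A (Python) =====
-- from typing import Dict, List, Tuple
--
-- def extract_table_name_from_file(string: str) -> str:
--     condition = lambda x: x != 'cad' and x != 'meta' and x != 'txt' and not x.isnumeric()
--     splitted_file_name = string.split('/')[-1].split('.')[0].split('_')
--     filtered_splitted_file_name = [word for word in splitted_file_name if condition(word)]
--     return '_'.join(filtered_splitted_file_name)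
--
-- def associate_tables_and_schemas(table_files: List[str], schema_files: List[str]) -> List[Dict[str, str]]:
--     result = []
--     schema_dict = {extract_table_name_from_file(file): file for file in schema_files}
--
--     for table in table_files:
--         table_base = extract_table_name_from_file(table)
--         matching_schema = schema_dict.get(table_base)
--
--         if not matching_schema:
--             table_base = max([
--                 schema for schema in schema_dict.keys() if schema in table_base
--             ], key=len, default=None)
--             matching_schema = schema_dict.get(table_base)
--
--         if matching_schema:
--             result.append({
--                 'table': table,
--                 'schema': matching_schema
--             })
--
--     return result
-- ===== SOURCE B (Python) =====
-- from typing import Dict, List, Tuple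
--
-- def extract_table_name_from_file(string: str) -> str:
--     condition = lambda x: x != 'cad' and x != 'meta' and x != 'txt' and not x.isnumeric()
--     splitted_file_name = string.split('/')[-1].split('.')[0].split('_')
--     filtered_splitted_file_name = [word for word in splitted_file_name if condition(word)]
--     return '_'.join(filtered_splitted_file_name)
--
-- def associate_tables_and_schemas(table_files: List[str], schema_files: List[str]) -> List[Dict[str, str]]:
--     # One unified rule replaces A's two-stage lookup (exact dict hit, then
--     # filter-keys-and-max(len)): the exact key, when present, is itself the unique
--     # longest schema key contained in the table base, so ranking the schema entries
--     # once by descending key length (stable) and taking the first contained key per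
--     # table yields the same schema.
--     schema_dict = {extract_table_name_from_file(f): f for f in schema_files}
--     ranked = sorted(schema_dict.items(), key=lambda kv: len(kv[0]), reverse=True)
--
--     def best(base):
--         for key, file in ranked:
--             if key in base:
--                 return file
--         return None
--
--     pairs = [(t, best(extract_table_name_from_file(t))) for t in table_files]
--     return [{'table': t, 'schema': s} for t, s in pairs if s]
-- ===== Notes on version B (the rewrite author's own statement) =====
-- stated objective: alternative
-- what changed: A's two-stage per-table lookup (exact dict hit, else filter all schema keys and take max by length) is replaced by one rule: rank the schema entries once by descending key length (stable sort) and take, per table, the first ranked key contained in the table base - the exact key, when present, is itself the unique longest contained key, so one early-exit scan replaces both stages.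
import Mathlib
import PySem

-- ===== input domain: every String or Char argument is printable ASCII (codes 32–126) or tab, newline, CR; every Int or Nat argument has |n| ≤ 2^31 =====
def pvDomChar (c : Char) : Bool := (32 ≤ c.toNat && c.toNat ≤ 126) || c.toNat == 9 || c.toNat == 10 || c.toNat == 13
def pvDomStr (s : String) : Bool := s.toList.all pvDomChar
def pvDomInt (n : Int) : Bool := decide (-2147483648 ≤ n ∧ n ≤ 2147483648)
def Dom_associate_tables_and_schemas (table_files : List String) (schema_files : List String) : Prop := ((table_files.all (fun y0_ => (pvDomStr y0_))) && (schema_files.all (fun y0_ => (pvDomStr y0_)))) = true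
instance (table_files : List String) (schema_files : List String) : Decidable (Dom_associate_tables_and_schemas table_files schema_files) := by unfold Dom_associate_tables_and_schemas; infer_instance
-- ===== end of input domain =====

-- B replaces A's two-stage per-table lookup (exact dict hit, else filter all keys and take
-- max by length) by ONE rule: rank the schema entries once by descending key length (stable)
-- and take, per table, the first ranked key contained in the table base (the exact key, when
-- present, is itself the unique longest contained key). Objective: alternative algorithm.

-- ===== PORT A =====
-- extract_table_name_from_file, shared verbatim by both Python versions.
-- 'x.isnumeric()' is ported as PySem.Str.strIsdigit: exact on the printable-ASCII domain Dom.
def pvExtract (s : String) : String :=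
  let last := ((PySem.Str.split? s "/").getD [""]).getLastD ""
  let stem := ((PySem.Str.split? last ".").getD [""]).headD ""
  let words := (PySem.Str.split? stem "_").getD [""]
  let filtered := words.filter
    (fun w => w ≠ "cad" && w ≠ "meta" && w ≠ "txt" && !(PySem.Str.strIsdigit w))
  PySem.Str.join "_" filtered

-- 'schema_dict.get(x)' applied to an Optional[str] key x (get(None) = None)
def pvGetOpt (d : PySem.Dict String String) : Option String → Option String
  | none => none
  | some k => d.get? k

def associate_tables_and_schemas (table_files : List String) (schema_files : List String) : List (List (String × String)) :=
  let schema_dict := schema_files.foldl (fun d f => d.insert (pvExtract f) f) PySem.Dict.empty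
  table_files.foldl (fun result table =>
    let table_base := pvExtract table
    let matching_schema := schema_dict.get? table_base
    let matching_schema :=
      if matching_schema.getD "" = "" then
        pvGetOpt schema_dict
          (PySem.List.max?
            (schema_dict.keys.filter (fun schema => PySem.Str.isIn schema table_base))
            (fun s => PySem.Str.len s))
      else matching_schema
    if matching_schema.getD "" = "" then result
    else result ++ [[("table", table), ("schema", matching_schema.getD "")]]) []

-- ===== PORT B =====
-- the inner 'best' loop of Source B: first ranked entry whose key is contained in base
def pvBest (ranked : List (String × String)) (base : String) : Option String :=
  match ranked with
  | [] => none
  | (key, file) :: rest =>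
      if PySem.Str.isIn key base then some file else pvBest rest base

def associate_tables_and_schemas_alt (table_files : List String) (schema_files : List String) : List (List (String × String)) :=
  let schema_dict := schema_files.foldl (fun d f => d.insert (pvExtract f) f) PySem.Dict.empty
  let ranked := PySem.List.sorted schema_dict.items (fun kv => PySem.Str.len kv.1) true
  let pairs := table_files.map (fun t => (t, pvBest ranked (pvExtract t)))
  pairs.filterMap (fun p =>
    match p.2 with
    | none => none
    | some s => if s = "" then none else some [("table", p.1), ("schema", s)])

-- ===== PRECONDITION & SPEC =====
def Spec_associate_tables_and_schemas (table_files : List String) (schema_files : List String) (out : List (List (String × String))) : Prop := out = associate_tables_and_schemas_alt table_files schema_files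
instance (table_files : List String) (schema_files : List String) (out : List (List (String × String))) : Decidable (Spec_associate_tables_and_schemas table_files schema_files out) := by unfold Spec_associate_tables_and_schemas; infer_instance

-- ===== CLAIM (what is proved, stated in full; the proofs are below) =====
def Claim_equal_associate_tables_and_schemas : Prop := ∀ (table_files : List String) (schema_files : List String), Dom_associate_tables_and_schemas table_files schema_files → Spec_associate_tables_and_schemas table_files schema_files (associate_tables_and_schemas table_files schema_files)

-- ===== LEMMAS AND PROOFS =====

-- pvBest is find?-then-project on the ranked list
lemma pvBest_eq_find? (base : String) : ∀ (ranked : List (String × String)),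
    pvBest ranked base
      = (ranked.find? (fun kv => PySem.Str.isIn kv.1 base)).map (fun kv => kv.2) := by
  intro ranked
  induction ranked with
  | nil => rfl
  | cons kv t ih =>
    obtain ⟨k, v⟩ := kv
    by_cases h : PySem.Str.isIn k base
    · have hT : PySem.Chars.isIn k.toList base.toList = true := by simpa using h
      have hf : List.find? (fun kv => PySem.Str.isIn kv.1 base) ((k, v) :: t) = some (k, v) := by
        simp [hT]
      rw [hf]
      simp only [pvBest]
      rw [if_pos h]
      rfl
    · have hF : PySem.Chars.isIn k.toList base.toList = false := by simpa using h
      have hf : List.find? (fun kv => PySem.Str.isIn kv.1 base) ((k, v) :: t)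
          = List.find? (fun kv => PySem.Str.isIn kv.1 base) t := by
        simp [hF]
      rw [hf]
      simp only [pvBest]
      rw [if_neg h]
      exact ih

-- containment facts about Str.isIn used below
lemma pv_isIn_self (s : String) : PySem.Str.isIn s s = true := by
  rw [PySem.Str.isIn_iff_infix]

lemma pv_eq_of_isIn_of_len_le (s t : String) (h : PySem.Str.isIn s t = true)
    (hlen : PySem.Str.len t ≤ PySem.Str.len s) : s = t := by
  rw [PySem.Str.isIn_iff_infix] at h
  apply String.toList_inj.mp
  apply h.sublist.eq_of_length
  have := h.length_le
  have h1 : PySem.Str.len s = s.toList.length := by simp [PySem.Str.len]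
  have h2 : PySem.Str.len t = t.toList.length := by simp [PySem.Str.len]
  omega

-- on a list sorted by descending key length with distinct keys, the FIRST key contained in
-- base is base itself whenever base occurs as a key (exact match = longest contained key)
lemma pv_find?_exact (base v : String) : ∀ (L : List (String × String)),
    L.Pairwise (fun a b => PySem.Str.len b.1 ≤ PySem.Str.len a.1) →
    (L.map (fun kv => kv.1)).Nodup → (base, v) ∈ L →
    L.find? (fun kv => PySem.Str.isIn kv.1 base) = some (base, v) := by
  intro L
  induction L with
  | nil => intro _ _ hmem; cases hmem
  | cons kv t ih =>
    intro hpw hnd hmem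
    obtain ⟨k, w⟩ := kv
    rcases List.pairwise_cons.mp hpw with ⟨hhd, hpt⟩
    rcases List.nodup_cons.mp hnd with ⟨hk, hndt⟩
    by_cases hin : PySem.Str.isIn k base
    · have hT : PySem.Chars.isIn k.toList base.toList = true := by simpa using hin
      have hf : List.find? (fun kv => PySem.Str.isIn kv.1 base) ((k, w) :: t) = some (k, w) := by
        simp [hT]
      rw [hf]
      rcases List.mem_cons.mp hmem with heq | hmt
      · rw [← heq]
      · exfalso
        have hlen : PySem.Str.len base ≤ PySem.Str.len k := hhd (base, v) hmt
        have : k = base := pv_eq_of_isIn_of_len_le k base hin hlen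
        exact hk (by simpa [this] using List.mem_map_of_mem (f := fun kv => kv.1) hmt)
    · have hF : PySem.Chars.isIn k.toList base.toList = false := by simpa using hin
      have hf : List.find? (fun kv => PySem.Str.isIn kv.1 base) ((k, w) :: t)
          = List.find? (fun kv => PySem.Str.isIn kv.1 base) t := by
        simp [hF]
      rw [hf]
      rcases List.mem_cons.mp hmem with heq | hmt
      · exact absurd (by rw [show k = base from (congrArg Prod.fst heq).symm]; exact pv_isIn_self base) hin
      · exact ih hpt hndt hmt

-- the 'first max' step function: folding it over l is max?(filter p l, key)
def pvStep {α κ : Type} [LinearOrder κ] (key : α → κ) (p : α → Bool) (acc : Option α) (x : α) : Option α :=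
  if p x = true then
    match acc with
    | none => some x
    | some m => if key m < key x then some x else some m
  else acc

lemma pv_find?_insertBy {α κ : Type} [LinearOrder κ] (key : α → κ) (p : α → Bool) (x : α) :
    ∀ (acc : List α), acc.Pairwise (fun a b => key b ≤ key a) →
    (PySem.List.insertBy (fun a b => decide (key b < key a)) x acc).find? p
      = pvStep key p (acc.find? p) x := by
  intro acc h
  induction acc with
  | nil =>
    by_cases hpx : p x <;> simp [PySem.List.insertBy, hpx, pvStep]
  | cons y ys ih =>
    rcases List.pairwise_cons.mp h with ⟨hy, hys⟩
    by_cases hxy : key y < key x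
    · have hins : PySem.List.insertBy (fun a b => decide (key b < key a)) x (y :: ys)
          = x :: y :: ys := by
        simp [PySem.List.insertBy, hxy]
      rw [hins]
      by_cases hpx : p x
      · rw [List.find?_cons_of_pos hpx]
        cases hfind : List.find? p (y :: ys) with
        | none => simp [pvStep, hpx]
        | some m =>
          have hm : m ∈ y :: ys := List.mem_of_find?_eq_some hfind
          have hle : key m ≤ key y := by
            rcases List.mem_cons.mp hm with rfl | hm'
            · exact le_refl _
            · exact hy m hm'
          simp [pvStep, hpx, lt_of_le_of_lt hle hxy]
      · rw [List.find?_cons_of_neg hpx]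
        simp [pvStep, hpx]
    · have hins : PySem.List.insertBy (fun a b => decide (key b < key a)) x (y :: ys)
          = y :: PySem.List.insertBy (fun a b => decide (key b < key a)) x ys := by
        simp [PySem.List.insertBy, hxy]
      rw [hins]
      have hle : key x ≤ key y := le_of_not_gt hxy
      by_cases hpy : p y
      · rw [List.find?_cons_of_pos hpy, List.find?_cons_of_pos hpy]
        by_cases hpx : p x <;> simp [pvStep, hpx, not_lt.mpr hle]
      · rw [List.find?_cons_of_neg hpy, List.find?_cons_of_neg hpy]
        exact ih hys

lemma pv_find?_foldl_insertBy {α κ : Type} [LinearOrder κ] (key : α → κ) (p : α → Bool) :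
    ∀ (l acc : List α), acc.Pairwise (fun a b => key b ≤ key a) →
    ((l.foldl (fun acc x => PySem.List.insertBy (fun a b => decide (key b < key a)) x acc) acc).find? p)
      = l.foldl (pvStep key p) (acc.find? p) := by
  intro l
  induction l with
  | nil => intro acc _; rfl
  | cons x l ih =>
    intro acc h
    rw [List.foldl_cons, List.foldl_cons,
      ih _ (PySem.List.insertBy_pairwise_ge key x acc h),
      pv_find?_insertBy key p x acc h]

lemma pv_find?_sorted_rev {α κ : Type} [LinearOrder κ] (l : List α) (key : α → κ) (p : α → Bool) :
    (PySem.List.sorted l key true).find? p = PySem.List.max? (l.filter p) key := by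
  rw [PySem.List.sorted_rev_eq_foldl_insertBy,
    pv_find?_foldl_insertBy key p l [] (by simp)]
  show l.foldl (pvStep key p) none = PySem.List.max? (l.filter p) key
  unfold PySem.List.max?
  rw [List.foldl_filter]
  rfl

lemma pv_max?_map_aux {α β κ : Type} [LinearOrder κ] (f : α → β) (k : β → κ) :
    ∀ (l : List α) (a : Option α),
    l.foldl (fun acc x =>
      match acc with
      | none => some (f x)
      | some m => if k m < k (f x) then some (f x) else some m) (a.map f)
      = (l.foldl (fun acc x =>
          match acc with
          | none => some x
          | some m => if k (f m) < k (f x) then some x else some m) a).map f := by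
  intro l
  induction l with
  | nil => intro a; rfl
  | cons x l ih =>
    intro a
    rw [List.foldl_cons, List.foldl_cons]
    cases a with
    | none => exact ih (some x)
    | some m =>
      simp only [Option.map_some]
      by_cases hk : k (f m) < k (f x)
      · simp only [hk, if_true]; exact ih (some x)
      · simp only [hk, if_false]; exact ih (some m)

lemma pv_max?_map_eq {α β κ : Type} [LinearOrder κ] (f : α → β) (k : β → κ) (l : List α) :
    PySem.List.max? (l.map f) k = (PySem.List.max? l (fun x => k (f x))).map f := by
  unfold PySem.List.max?
  rw [List.foldl_map]
  exact pv_max?_map_aux f k l none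

-- A's fallback (max-by-length over the contained keys, then a dict lookup) is B's
-- find?-on-the-ranked-items
lemma pv_fallback_eq (d : PySem.Dict String String) (hnd : d.keys.Nodup) (tb : String) :
    pvGetOpt d
      (PySem.List.max? (d.keys.filter (fun schema => PySem.Str.isIn schema tb))
        (fun s => PySem.Str.len s))
    = ((PySem.List.sorted d.items (fun kv => PySem.Str.len kv.1) true).find?
        (fun kv => PySem.Str.isIn kv.1 tb)).map (fun kv => kv.2) := by
  rw [pv_find?_sorted_rev]
  have hkeys : d.keys = d.items.map (fun kv => kv.1) := rfl
  rw [hkeys, List.filter_map, pv_max?_map_eq]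
  have hp : (d.items.filter ((fun schema => PySem.Str.isIn schema tb) ∘ fun kv => kv.1))
      = d.items.filter (fun kv => PySem.Str.isIn kv.1 tb) := rfl
  rw [hp]
  cases hmax : PySem.List.max? (d.items.filter (fun kv => PySem.Str.isIn kv.1 tb))
      (fun x => PySem.Str.len x.1) with
  | none => rfl
  | some kv =>
    have hmem : kv ∈ d.items :=
      List.mem_of_mem_filter (PySem.List.max?_mem hmax)
    simp only [Option.map_some]
    show d.get? kv.1 = some kv.2
    exact PySem.Dict.get?_of_mem_items d (by cases kv; exact hmem) hnd

-- per-table: A's whole option computation equals B's single scan of the ranked list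
lemma pv_opt_eq (d : PySem.Dict String String) (hnd : d.keys.Nodup) (base : String) :
    (if (d.get? base).getD "" = "" then
        pvGetOpt d
          (PySem.List.max? (d.keys.filter (fun schema => PySem.Str.isIn schema base))
            (fun s => PySem.Str.len s))
      else d.get? base)
    = pvBest (PySem.List.sorted d.items (fun kv => PySem.Str.len kv.1) true) base := by
  rw [pvBest_eq_find? base]
  cases hget : d.get? base with
  | none => simp only [Option.getD_none]; rw [if_pos trivial]; exact pv_fallback_eq d hnd base
  | some v =>
    by_cases hv : v = ""
    · simp only [hv, Option.getD_some]
      rw [if_pos trivial]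
      exact pv_fallback_eq d hnd base
    · rw [if_neg (by simpa using hv)]
      have hmem : (base, v) ∈ PySem.List.sorted d.items (fun kv => PySem.Str.len kv.1) true :=
        (PySem.List.mem_sorted _ _ _ _).mpr (PySem.Dict.mem_items_of_get?_eq_some d hget)
      have hpw := PySem.List.sorted_pairwise_rev d.items (fun kv => PySem.Str.len kv.1)
      have hnd' : (d.items.map (fun kv => kv.1)).Nodup := hnd
      have hndL : ((PySem.List.sorted d.items (fun kv => PySem.Str.len kv.1) true).map
          (fun kv => kv.1)).Nodup :=
        (((PySem.List.sorted_perm d.items (fun kv => PySem.Str.len kv.1) true).map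
          (fun kv => kv.1)).nodup_iff).mpr hnd'
      rw [pv_find?_exact base v _ hpw hndL hmem]
      rfl

-- the dict built by the comprehension has distinct keys
lemma pv_dict_nodup (schema_files : List String) :
    ((schema_files.foldl (fun d f => d.insert (pvExtract f) f) PySem.Dict.empty).keys).Nodup :=
  PySem.Dict.nodup_keys_foldl_insert_key schema_files pvExtract (fun _ f => f)
    PySem.Dict.empty PySem.Dict.nodup_keys_empty

-- loop shape: A's conditional-append foldl over the tables is B's map-then-filterMap
lemma pv_loop (F : String → Option String) :
    ∀ (l : List String) (r : List (List (String × String))),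
    l.foldl (fun result t =>
        if (F t).getD "" = "" then result
        else result ++ [[("table", t), ("schema", (F t).getD "")]]) r
      = r ++ (l.map (fun t => (t, F t))).filterMap (fun p =>
          match p.2 with
          | none => none
          | some s => if s = "" then none else some [("table", p.1), ("schema", s)]) := by
  intro l
  induction l with
  | nil => intro r; simp
  | cons t l ih =>
    intro r
    rw [List.map_cons, List.filterMap_cons, List.foldl_cons]
    cases hF : F t with
    | none => simp only [hF, Option.getD_none, if_pos rfl]; exact ih r
    | some s =>
      by_cases hs : s = ""
      · simp only [hF, hs, Option.getD_some, if_pos rfl]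
        exact ih r
      · simp only [hF, Option.getD_some, if_neg hs]
        rw [ih (r ++ [[("table", t), ("schema", s)]]), List.append_assoc]
        rfl

-- ===== VERDICT (by name: the statement is the Claim_ definition above) =====
theorem associate_tables_and_schemas_spec : Claim_equal_associate_tables_and_schemas := by
  intro table_files schema_files hdom
  clear hdom
  unfold Spec_associate_tables_and_schemas
  unfold associate_tables_and_schemas associate_tables_and_schemas_alt
  simp only []
  have hnd := pv_dict_nodup schema_files
  set d := schema_files.foldl (fun d f => d.insert (pvExtract f) f) PySem.Dict.empty with hd
  have hbody : ∀ (result : List (List (String × String))) (table : String),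
      (let table_base := pvExtract table
       let matching_schema := d.get? table_base
       let matching_schema :=
         if matching_schema.getD "" = "" then
           pvGetOpt d
             (PySem.List.max?
               (d.keys.filter (fun schema => PySem.Str.isIn schema table_base))
               (fun s => PySem.Str.len s))
         else matching_schema
       if matching_schema.getD "" = "" then result
       else result ++ [[("table", table), ("schema", matching_schema.getD "")]])
      = (if ((fun t => pvBest (PySem.List.sorted d.items (fun kv => PySem.Str.len kv.1) true)
              (pvExtract t)) table).getD "" = "" then result
         else result ++ [[("table", table),
           ("schema", ((fun t => pvBest (PySem.List.sorted d.items (fun kv => PySem.Str.len kv.1) true)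
              (pvExtract t)) table).getD "")]]) := by
    intro result table
    show (if ((if (d.get? (pvExtract table)).getD "" = "" then _ else d.get? (pvExtract table))).getD "" = ""
          then result else _) = _
    rw [pv_opt_eq d hnd (pvExtract table)]
  calc table_files.foldl _ []
      = table_files.foldl (fun result t =>
          if ((fun t => pvBest (PySem.List.sorted d.items (fun kv => PySem.Str.len kv.1) true)
                (pvExtract t)) t).getD "" = "" then result
          else result ++ [[("table", t),
            ("schema", ((fun t => pvBest (PySem.List.sorted d.items (fun kv => PySem.Str.len kv.1) true)
                (pvExtract t)) t).getD "")]]) [] := by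
        congr 1
        funext result table
        exact hbody result table
    _ = _ := by
        rw [pv_loop (fun t => pvBest (PySem.List.sorted d.items (fun kv => PySem.Str.len kv.1) true)
            (pvExtract t)) table_files []]
        rw [List.nil_append]
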